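-- pv_equiv track=rewrite | github.com/codygnon/usdjpy-assistant | scripts/backtest_v7_defended_phase3a_reproduce.py | _count_trades_by_session
-- ===== SOURCE A (Python) =====
-- from typing import Any
--
-- def _count_trades_by_session(trades: list[dict[str, Any]]) -> dict[str, int]:
--     c = {
--         "tokyo_v14": 0,
--         "london_v2_setup_a": 0,
--         "london_v2_setup_d_l1": 0,
--         "v44_ny": 0,
--     }
--     for t in trades:
--         s = str(t.get("strategy", ""))
--         if s == "v14":
--             c["tokyo_v14"] += 1
--         elif s == "v44_ny":
--             c["v44_ny"] += 1
--         elif s == "london_v2":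
--             if str(t.get("setup_type", "")) == "D":
--                 c["london_v2_setup_d_l1"] += 1
--             elif str(t.get("setup_type", "")) == "A":
--                 c["london_v2_setup_a"] += 1
--             else:
--                 c["london_v2_setup_d_l1"] += 1  # default bucket for unknown
--     return c
-- ===== SOURCE B (Python) =====
-- def _count_trades_by_session(trades):
--     # Four independent counting passes, one per bucket, instead of one branching loop.
--     return {
--         "tokyo_v14": sum(1 for t in trades if str(t.get("strategy", "")) == "v14"),
--         "london_v2_setup_a": sum(
--             1 for t in trades
--             if str(t.get("strategy", "")) == "london_v2"
--             and str(t.get("setup_type", "")) == "A"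
--         ),
--         "london_v2_setup_d_l1": sum(
--             1 for t in trades
--             if str(t.get("strategy", "")) == "london_v2"
--             and str(t.get("setup_type", "")) != "A"
--         ),
--         "v44_ny": sum(1 for t in trades if str(t.get("strategy", "")) == "v44_ny"),
--     }
-- ===== Notes on version B (the rewrite author's own statement) =====
-- stated objective: alternative
-- what changed: B builds the result dict directly from four independent counting passes (one sum-of-1 comprehension per bucket) instead of A's single loop with nested branches mutating a pre-seeded counter dict.
import Mathlib
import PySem

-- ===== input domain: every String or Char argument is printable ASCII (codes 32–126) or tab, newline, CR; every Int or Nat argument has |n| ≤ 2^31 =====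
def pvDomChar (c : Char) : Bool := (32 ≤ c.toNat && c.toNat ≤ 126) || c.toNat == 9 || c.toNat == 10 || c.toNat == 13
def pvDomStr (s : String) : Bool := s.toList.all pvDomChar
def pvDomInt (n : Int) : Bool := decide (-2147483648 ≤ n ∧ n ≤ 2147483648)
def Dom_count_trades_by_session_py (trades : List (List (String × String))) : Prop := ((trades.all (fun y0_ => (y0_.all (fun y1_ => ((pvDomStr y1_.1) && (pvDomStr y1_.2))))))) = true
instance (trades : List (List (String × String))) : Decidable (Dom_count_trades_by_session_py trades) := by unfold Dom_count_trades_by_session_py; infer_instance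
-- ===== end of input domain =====

-- B counts each of the four buckets with its own independent pass instead of A's
-- single branching loop over a mutable counter dict (objective: alternative decomposition).

-- ===== PORT A =====
-- loop body of A: classify one trade t and bump its bucket in the counter dict c
def pvStepA (c : PySem.Dict String Int) (t : List (String × String)) : PySem.Dict String Int :=
  let td := PySem.Dict.ofList t
  let s := td.getD "strategy" ""
  if s == "v14" then c.modify "tokyo_v14" 0 (· + 1)
  else if s == "v44_ny" then c.modify "v44_ny" 0 (· + 1)
  else if s == "london_v2" then
    if td.getD "setup_type" "" == "D" then c.modify "london_v2_setup_d_l1" 0 (· + 1)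
    else if td.getD "setup_type" "" == "A" then c.modify "london_v2_setup_a" 0 (· + 1)
    else c.modify "london_v2_setup_d_l1" 0 (· + 1)
  else c

def count_trades_by_session_py (trades : List (List (String × String))) : List (String × Int) :=
  (trades.foldl pvStepA
    (PySem.Dict.ofList
      [("tokyo_v14", 0), ("london_v2_setup_a", 0), ("london_v2_setup_d_l1", 0), ("v44_ny", 0)])).items

-- ===== PORT B =====
def count_trades_by_session_py_alt (trades : List (List (String × String))) : List (String × Int) :=
  [("tokyo_v14",
      (trades.countP (fun t => (PySem.Dict.ofList t).getD "strategy" "" == "v14") : Int)),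
   ("london_v2_setup_a",
      (trades.countP (fun t => (PySem.Dict.ofList t).getD "strategy" "" == "london_v2"
        && (PySem.Dict.ofList t).getD "setup_type" "" == "A") : Int)),
   ("london_v2_setup_d_l1",
      (trades.countP (fun t => (PySem.Dict.ofList t).getD "strategy" "" == "london_v2"
        && !((PySem.Dict.ofList t).getD "setup_type" "" == "A")) : Int)),
   ("v44_ny",
      (trades.countP (fun t => (PySem.Dict.ofList t).getD "strategy" "" == "v44_ny") : Int))]

-- ===== PRECONDITION & SPEC =====
def Spec_count_trades_by_session_py (trades : List (List (String × String))) (out : List (String × Int)) : Prop := out = count_trades_by_session_py_alt trades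
instance (trades : List (List (String × String))) (out : List (String × Int)) : Decidable (Spec_count_trades_by_session_py trades out) := by unfold Spec_count_trades_by_session_py; infer_instance

-- ===== CLAIM (what is proved, stated in full; the proofs are below) =====
def Claim_equal_count_trades_by_session_py : Prop := ∀ (trades : List (List (String × String))), Dom_count_trades_by_session_py trades → Spec_count_trades_by_session_py trades (count_trades_by_session_py trades)

-- ===== LEMMAS AND PROOFS =====
-- abbreviation for the concrete 4-key counter state A's loop maintains
def pvMk (a b c d : Int) : PySem.Dict String Int :=
  PySem.Dict.ofList
    [("tokyo_v14", a), ("london_v2_setup_a", b), ("london_v2_setup_d_l1", c), ("v44_ny", d)]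

lemma pvMk_congr {a b c d a' b' c' d' : Int} (ha : a = a') (hb : b = b')
    (hc : c = c') (hd : d = d') : pvMk a b c d = pvMk a' b' c' d' := by
  subst ha hb hc hd; rfl

lemma pvFoldl_step (ts : List (List (String × String))) (a b c d : Int) :
    ts.foldl pvStepA (pvMk a b c d)
      = pvMk (a + (ts.countP (fun t => (PySem.Dict.ofList t).getD "strategy" "" == "v14") : Int))
             (b + (ts.countP (fun t => (PySem.Dict.ofList t).getD "strategy" "" == "london_v2"
                    && (PySem.Dict.ofList t).getD "setup_type" "" == "A") : Int))
             (c + (ts.countP (fun t => (PySem.Dict.ofList t).getD "strategy" "" == "london_v2"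
                    && !((PySem.Dict.ofList t).getD "setup_type" "" == "A")) : Int))
             (d + (ts.countP (fun t => (PySem.Dict.ofList t).getD "strategy" "" == "v44_ny") : Int)) := by
  induction ts generalizing a b c d with
  | nil => simp [pvMk]
  | cons t ts ih =>
    have h1 : pvStepA (pvMk a b c d) t =
        if (PySem.Dict.ofList t).getD "strategy" "" == "v14" then pvMk (a + 1) b c d
        else if (PySem.Dict.ofList t).getD "strategy" "" == "v44_ny" then pvMk a b c (d + 1)
        else if (PySem.Dict.ofList t).getD "strategy" "" == "london_v2" then
          if (PySem.Dict.ofList t).getD "setup_type" "" == "D" then pvMk a b (c + 1) d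
          else if (PySem.Dict.ofList t).getD "setup_type" "" == "A" then pvMk a (b + 1) c d
          else pvMk a b (c + 1) d
        else pvMk a b c d := by
      simp only [pvStepA]
      split_ifs <;> rfl
    simp only [List.foldl_cons, h1]
    split_ifs with hs1 hs2 hs3 hd ha <;>
      simp_all <;>
      apply pvMk_congr <;> ring

lemma pvItems_mk (a b c d : Int) :
    (pvMk a b c d).items
      = [("tokyo_v14", a), ("london_v2_setup_a", b), ("london_v2_setup_d_l1", c), ("v44_ny", d)] := rfl

-- ===== VERDICT (by name: the statement is the Claim_ definition above) =====
theorem count_trades_by_session_py_spec : Claim_equal_count_trades_by_session_py := by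
  intro trades _
  show count_trades_by_session_py trades = count_trades_by_session_py_alt trades
  have : PySem.Dict.ofList
      [("tokyo_v14", (0 : Int)), ("london_v2_setup_a", 0), ("london_v2_setup_d_l1", 0), ("v44_ny", 0)]
      = pvMk 0 0 0 0 := rfl
  simp only [count_trades_by_session_py, this, pvFoldl_step, pvItems_mk, zero_add,
    count_trades_by_session_py_alt]
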